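-- pv_equiv track=rewrite | github.com/PhasitWo/Chula | Algo/lab10/q1.py | check_vertex_cover
-- ===== SOURCE A (Python) =====
-- import itertools, networkx, matplotlib.pyplot as plt
--
-- def check_vertex_cover(matrix: list[list[int]], k:int) -> list:
--     vertex_cnt = len(matrix)
--     combinations = itertools.combinations(range(1, vertex_cnt+1), k)
--     ans = []
--     for c in combinations:
--         is_vc = True
--         for i in range(vertex_cnt):
--             for j in range(i+1, vertex_cnt):
--                 if matrix[i][j] == 1:
--                     # plus 1 to match vertex-indexing style of combinations
--                     if (i+1 not in c) and (j+1 not in c):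
--                         is_vc = False
--                         break
--             if not is_vc:
--                 break
--         if is_vc:
--             ans.append(c)
--     return ans
-- ===== SOURCE B (Python) =====
-- def check_vertex_cover(matrix: list[list[int]], k: int) -> list:
--     n = len(matrix)
--     ans = []
--
--     def go(v, chosen):
--         # feasibility prune: not enough vertices left to reach size k
--         if len(chosen) + (n + 1 - v) < k:
--             return
--         if v == n + 1:
--             if len(chosen) == k:
--                 ans.append(tuple(chosen))
--             return
--         # branch 1: include vertex v (only useful while the cover is not full)
--         if len(chosen) < k:
--             go(v + 1, chosen + [v])
--         # branch 2: exclude v — viable only if every edge (u, v) with u < v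
--         # is already covered by an earlier chosen vertex
--         if all(matrix[u - 1][v - 1] != 1 or u in chosen for u in range(1, v)):
--             go(v + 1, chosen)
--
--     go(1, [])
--     return ans
-- ===== Notes on version B (the rewrite author's own statement) =====
-- stated objective: alternative
-- what changed: B replaces A's generate-and-test over itertools.combinations with a recursive include/exclude backtracking search that prunes a branch as soon as excluding a vertex leaves an edge to an earlier non-chosen vertex uncovered (and prunes includes past size k), emitting covers directly in lexicographic order.
-- outside the precondition, e.g. on check_vertex_cover([[0, 0, 0, 1], [0], [0], [0, 0, 0]], 0): A returns [], B raises IndexError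
import Mathlib
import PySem

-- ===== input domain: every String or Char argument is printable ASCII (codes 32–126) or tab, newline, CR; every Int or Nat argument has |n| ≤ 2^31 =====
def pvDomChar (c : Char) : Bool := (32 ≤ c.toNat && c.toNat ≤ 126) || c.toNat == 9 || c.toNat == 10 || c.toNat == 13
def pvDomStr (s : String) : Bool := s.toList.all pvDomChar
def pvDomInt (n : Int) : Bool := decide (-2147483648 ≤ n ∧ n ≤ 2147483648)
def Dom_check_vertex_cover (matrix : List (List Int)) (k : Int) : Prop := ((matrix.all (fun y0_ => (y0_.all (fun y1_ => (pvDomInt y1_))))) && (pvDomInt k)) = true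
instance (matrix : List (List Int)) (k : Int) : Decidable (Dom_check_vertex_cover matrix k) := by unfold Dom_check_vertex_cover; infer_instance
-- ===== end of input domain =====

-- B is a recursive include/exclude backtracking search with pruning instead of A's
-- generate-and-test over all k-combinations (objective: alternative).


-- ===== PORT A =====
-- itertools.combinations(range(...), m), lexicographic
def pyCombos (l : List Int) (m : Nat) : List (List Int) :=
  match m, l with
  | 0, _ => [[]]
  | _+1, [] => []
  | m+1, x :: xs => (pyCombos xs m).map (fun c => x :: c) ++ pyCombos xs (m+1)

-- matrix[i][j]; inside Pre_ the indices are always in range, so the default is never taken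
def pvMget (matrix : List (List Int)) (i j : Int) : Int :=
  (PySem.List.pyGet? ((PySem.List.pyGet? matrix i).getD []) j).getD 0

-- A's inner 'for j in range(i+1, n)' loop with its break (false = broke out with is_vc = False)
def pvLoopJ (matrix : List (List Int)) (c : List Int) (i : Int) : List Int → Bool
  | [] => true
  | j :: js =>
    if pvMget matrix i j == 1 && !(c.contains (i+1)) && !(c.contains (j+1)) then false
    else pvLoopJ matrix c i js

-- A's outer 'for i in range(n)' loop with its break
def pvLoopI (matrix : List (List Int)) (c : List Int) (n : Int) : List Int → Bool
  | [] => true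
  | i :: is =>
    if pvLoopJ matrix c i (PySem.List.pyRange (i+1) n 1) then pvLoopI matrix c n is else false

def check_vertex_cover (matrix : List (List Int)) (k : Int) : List (List Int) :=
  let n : Int := matrix.length
  let combos := pyCombos (PySem.List.pyRange 1 (n+1) 1) k.toNat
  combos.foldl
    (fun ans c => if pvLoopI matrix c n (PySem.List.pyRange 0 n 1) then ans ++ [c] else ans) []

-- ===== PORT B =====
-- B's 'all(matrix[u-1][v-1] != 1 or u in chosen for u in range(1, v))'
def pvCheckEx (matrix : List (List Int)) (chosen : List Int) (v : Int) : Bool :=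
  (PySem.List.pyRange 1 v 1).all
    (fun u => !(pvMget matrix (u-1) (v-1) == 1) || chosen.contains u)

-- B's recursive go(v, chosen); the Nat counter is n+1-v (0 exactly when v == n+1)
def pvGo (matrix : List (List Int)) (n k : Int) : Nat → Int → List Int → List (List Int)
  | 0, v, chosen =>
      if (chosen.length : Int) + (n + 1 - v) < k then []
      else if (chosen.length : Int) == k then [chosen] else []
  | m+1, v, chosen =>
      if (chosen.length : Int) + (n + 1 - v) < k then []
      else
        (if (chosen.length : Int) < k then pvGo matrix n k m (v+1) (chosen ++ [v]) else [])
        ++ (if pvCheckEx matrix chosen v then pvGo matrix n k m (v+1) chosen else [])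

def check_vertex_cover_alt (matrix : List (List Int)) (k : Int) : List (List Int) :=
  pvGo matrix matrix.length k matrix.length 1 []

-- ===== PRECONDITION & SPEC =====
-- Pre_ excludes negative k (A raises ValueError in itertools.combinations) and ragged
-- matrices where a non-last row is shorter than len(matrix), unless k > n (then neither
-- program reads the matrix): on such ragged inputs A raises IndexError on almost every
-- input, and where it still returns the value depends on which entry its row scan
-- reaches first — an accident of the short row's position.
def Pre_check_vertex_cover (matrix : List (List Int)) (k : Int) : Prop :=
  0 ≤ k ∧
    ((∀ row ∈ matrix.dropLast, matrix.length ≤ row.length) ∨ (matrix.length : Int) < k)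
instance (matrix : List (List Int)) (k : Int) : Decidable (Pre_check_vertex_cover matrix k) := by
  unfold Pre_check_vertex_cover; infer_instance

def pvWitness_check_vertex_cover : List (List Int) × Int := ([[0, 1], [1, 0]], 1)

def Spec_check_vertex_cover (matrix : List (List Int)) (k : Int) (out : List (List Int)) : Prop := out = check_vertex_cover_alt matrix k
instance (matrix : List (List Int)) (k : Int) (out : List (List Int)) : Decidable (Spec_check_vertex_cover matrix k out) := by unfold Spec_check_vertex_cover; infer_instance

-- ===== CLAIM (what is proved, stated in full; the proofs are below) =====
def Claim_equal_check_vertex_cover : Prop := ∀ (matrix : List (List Int)) (k : Int), Dom_check_vertex_cover matrix k → Pre_check_vertex_cover matrix k → Spec_check_vertex_cover matrix k (check_vertex_cover matrix k)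

-- ===== LEMMAS AND PROOFS =====

-- A's inner loop, as a Prop over the scanned js
theorem pvLoopJ_iff (matrix : List (List Int)) (c : List Int) (i : Int) (js : List Int) :
    pvLoopJ matrix c i js = true ↔
      ∀ j ∈ js, pvMget matrix i j = 1 → ((i+1) ∈ c ∨ (j+1) ∈ c) := by
  induction js with
  | nil => simp [pvLoopJ]
  | cons j js ih =>
    simp only [pvLoopJ]
    cases hcond : (pvMget matrix i j == 1 && !(c.contains (i+1)) && !(c.contains (j+1))) with
    | true =>
      rw [if_pos rfl]
      simp only [Bool.and_eq_true, beq_iff_eq, Bool.not_eq_true',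
        List.contains_eq_mem, decide_eq_false_iff_not] at hcond
      constructor
      · intro hfalse; cases hfalse
      · intro hall
        rcases hall j (List.mem_cons_self) hcond.1.1 with hc | hc
        · exact absurd hc hcond.1.2
        · exact absurd hc hcond.2
    | false =>
      rw [if_neg (by simp)]
      rw [ih]
      simp only [Bool.and_eq_false_iff, beq_eq_false_iff_ne, ne_eq, Bool.not_eq_false',
        List.contains_eq_mem, decide_eq_true_eq] at hcond
      constructor
      · intro hall j' hj' hm
        rcases List.mem_cons.mp hj' with hj' | hj'
        · subst hj'
          rcases hcond with (hc | hc) | hc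
          · exact absurd hm hc
          · exact Or.inl hc
          · exact Or.inr hc
        · exact hall j' hj' hm
      · intro hall j' hj' hm; exact hall j' (List.mem_cons_of_mem _ hj') hm

-- A's outer loop, as a Prop
theorem pvLoopI_iff (matrix : List (List Int)) (c : List Int) (n : Int) (is : List Int) :
    pvLoopI matrix c n is = true ↔
      ∀ i ∈ is, ∀ j, i < j → j < n → pvMget matrix i j = 1 → ((i+1) ∈ c ∨ (j+1) ∈ c) := by
  induction is with
  | nil => simp [pvLoopI]
  | cons i is ih =>
    simp only [pvLoopI]
    by_cases h : pvLoopJ matrix c i (PySem.List.pyRange (i+1) n 1) = true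
    · rw [if_pos h, ih]
      rw [pvLoopJ_iff] at h
      constructor
      · intro hall i' hi' j hij hjn hm
        rcases List.mem_cons.mp hi' with hi' | hi'
        · subst hi'
          exact h j (by rw [PySem.List.mem_pyRange_one]; omega) hm
        · exact hall i' hi' j hij hjn hm
      · intro hall i' hi' j hij hjn hm
        exact hall i' (List.mem_cons_of_mem _ hi') j hij hjn hm
    · rw [if_neg h]
      rw [pvLoopJ_iff] at h
      push_neg at h
      rcases h with ⟨j, hj, hm, hna, hnb⟩
      rw [PySem.List.mem_pyRange_one] at hj
      simp only [Bool.false_eq_true, false_iff]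
      intro hall
      rcases hall i List.mem_cons_self j (by omega) (by omega) hm with hc | hc
      · exact hna hc
      · exact hnb hc

-- B's exclusion check, as a Prop
theorem pvCheckEx_iff (matrix : List (List Int)) (chosen : List Int) (v : Int) :
    pvCheckEx matrix chosen v = true ↔
      ∀ u, 1 ≤ u → u < v → pvMget matrix (u-1) (v-1) = 1 → u ∈ chosen := by
  unfold pvCheckEx
  rw [List.all_eq_true]
  constructor
  · intro h u h1 h2 hm
    have := h u (by rw [PySem.List.mem_pyRange_one]; omega)
    simp only [Bool.or_eq_true, Bool.not_eq_true', beq_eq_false_iff_ne, ne_eq,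
      List.contains_eq_mem, decide_eq_true_eq] at this
    rcases this with h' | h'
    · exact absurd hm h'
    · exact h'
  · intro h u hu
    rw [PySem.List.mem_pyRange_one] at hu
    simp only [Bool.or_eq_true, Bool.not_eq_true', beq_eq_false_iff_ne, ne_eq,
      List.contains_eq_mem, decide_eq_true_eq]
    by_cases hm : pvMget matrix (u-1) (v-1) = 1
    · exact Or.inr (h u hu.1 hu.2 hm)
    · exact Or.inl hm

-- members of a combination come from the source list
theorem mem_of_mem_pyCombos (l : List Int) (m : Nat) (c : List Int)
    (hc : c ∈ pyCombos l m) : ∀ x ∈ c, x ∈ l := by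
  induction l generalizing m c with
  | nil =>
    cases m with
    | zero => simp [pyCombos] at hc; simp [hc]
    | succ m => simp [pyCombos] at hc
  | cons a l ih =>
    cases m with
    | zero => simp [pyCombos] at hc; simp [hc]
    | succ m =>
      simp only [pyCombos, List.mem_append, List.mem_map] at hc
      rcases hc with ⟨c', hc', rfl⟩ | hc
      · intro x hx
        rcases List.mem_cons.mp hx with hx | hx
        · simp [hx]
        · exact List.mem_cons_of_mem _ (ih m c' hc' x hx)
      · intro x hx; exact List.mem_cons_of_mem _ (ih (m+1) c hc x hx)

-- the append-to-ans foldl is a filter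
theorem pvFoldl_filter {α : Type} (p : α → Bool) (cs acc : List α) :
    cs.foldl (fun ans c => if p c then ans ++ [c] else ans) acc = acc ++ cs.filter p := by
  induction cs generalizing acc with
  | nil => simp
  | cons c cs ih =>
    simp only [List.foldl_cons, List.filter_cons]
    by_cases h : p c <;> simp [h, ih]

-- too few source elements leave no combination
theorem pyCombos_eq_nil (l : List Int) (r : Nat) (h : l.length < r) : pyCombos l r = [] := by
  induction l generalizing r with
  | nil =>
    cases r with
    | zero => simp at h
    | succ s => simp [pyCombos]
  | cons a l ih =>
    cases r with
    | zero => simp at h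
    | succ s =>
      simp only [pyCombos]
      rw [ih s (by simpa using h), ih (s+1) (by simp at h ⊢; omega)]
      simp

-- the backtracking search equals "filter the combinations of the remaining range by A's test",
-- under the invariant that all edges into already-excluded vertices are covered by chosen
theorem pvGo_eq (matrix : List (List Int)) (k : Int) (hk : 0 ≤ k) :
    ∀ (m : Nat) (v : Int) (chosen : List Int),
      v + m = (matrix.length : Int) + 1 →
      chosen.length ≤ k.toNat →
      (∀ x ∈ chosen, x < v) →
      (∀ i j : Int, 0 ≤ i → i < j → j < (matrix.length : Int) → j + 1 < v →
        pvMget matrix i j = 1 → ((i+1) ∈ chosen ∨ (j+1) ∈ chosen)) →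
      pvGo matrix (matrix.length : Int) k m v chosen =
        ((pyCombos (PySem.List.pyRange v ((matrix.length : Int)+1) 1)
            (k.toNat - chosen.length)).map (fun c => chosen ++ c)).filter
          (fun c => pvLoopI matrix c (matrix.length : Int)
            (PySem.List.pyRange 0 (matrix.length : Int) 1)) := by
  intro m
  induction m with
  | zero =>
    intro v chosen hv hlen _ hinv
    have hvn : v = (matrix.length : Int) + 1 := by omega
    subst hvn
    rw [PySem.List.pyRange_one_eq_nil (le_refl _)]
    simp only [pvGo]
    by_cases hprune : (chosen.length : Int) + ((matrix.length : Int) + 1 - ((matrix.length : Int) + 1)) < k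
    swap
    rcases Nat.eq_or_lt_of_le hlen with heq | hlt
    · rw [if_neg hprune]
      have hr : k.toNat - chosen.length = 0 := by omega
      rw [hr]
      simp only [pyCombos, List.map_cons, List.map_nil, List.append_nil, List.filter_cons,
        List.filter_nil]
      have hb : ((chosen.length : Int) == k) = true := by
        simp only [beq_iff_eq]; omega
      rw [hb]
      have hP : pvLoopI matrix chosen (matrix.length : Int)
          (PySem.List.pyRange 0 (matrix.length : Int) 1) = true := by
        rw [pvLoopI_iff]
        intro i hi j hij hjn hm
        rw [PySem.List.mem_pyRange_one] at hi
        exact hinv i j hi.1 hij hjn (by omega) hm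
      simp [hP]
    · exact absurd hprune (by omega)
    · rw [if_pos hprune]
      have hr : ∃ s, k.toNat - chosen.length = s + 1 := ⟨k.toNat - chosen.length - 1, by omega⟩
      rcases hr with ⟨s, hs⟩
      rw [hs]
      simp [pyCombos]
  | succ m ih =>
    intro v chosen hv hlen hlt hinv
    have hvle : v < (matrix.length : Int) + 1 := by omega
    rw [PySem.List.pyRange_one_cons hvle]
    simp only [pvGo]
    -- shared facts
    have hvn : v ≤ (matrix.length : Int) := by omega
    by_cases hprune : (chosen.length : Int) + ((matrix.length : Int) + 1 - v) < k
    · rw [if_pos hprune]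
      symm
      rw [pyCombos_eq_nil _ _ (by
        simp only [List.length_cons, PySem.List.length_pyRange_one]
        omega)]
      simp
    rw [if_neg hprune]
    rcases Nat.eq_or_lt_of_le hlen with heq | hltk
    · -- chosen is already full: include branch is empty, r = 0
      have hr : k.toNat - chosen.length = 0 := by omega
      rw [hr]
      have hb : ((chosen.length : Int) < k) = False := by
        simp only [eq_iff_iff, iff_false, not_lt]; omega
      simp only [pyCombos, List.map_cons, List.map_nil, List.append_nil, List.filter_cons,
        List.filter_nil, hb, if_false, List.nil_append]
      by_cases hchk : pvCheckEx matrix chosen v = true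
      · rw [if_pos hchk]
        have := ih (v+1) chosen (by omega) hlen
          (fun x hx => lt_trans (hlt x hx) (by omega))
          (by
            intro i j h0 hij hjn hjv hm
            by_cases hjv' : j + 1 < v
            · exact hinv i j h0 hij hjn hjv' hm
            · have hjv2 : j + 1 = v := by omega
              rw [pvCheckEx_iff] at hchk
              have := hchk (i+1) (by omega) (by omega)
                (by simpa [show i + 1 - 1 = i by ring, show v - 1 = j by omega] using hm)
              exact Or.inl this)
        rw [this, hr]
        by_cases hP : pvLoopI matrix chosen (matrix.length : Int)
            (PySem.List.pyRange 0 (matrix.length : Int) 1) <;>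
          simp [pyCombos, hP]
      · rw [if_neg hchk]
        -- chosen fails A's test: the (u-1, v-1) edge is uncovered
        rw [pvCheckEx_iff] at hchk
        push_neg at hchk
        rcases hchk with ⟨u, hu1, huv, hm, hunc⟩
        have hP : pvLoopI matrix chosen (matrix.length : Int)
            (PySem.List.pyRange 0 (matrix.length : Int) 1) = false := by
          rw [Bool.eq_false_iff, ne_eq, pvLoopI_iff]
          push_neg
          refine ⟨u - 1, by rw [PySem.List.mem_pyRange_one]; omega, v - 1, by omega, by omega,
            hm, ?_, ?_⟩
          · simpa [show u - 1 + 1 = u by ring] using hunc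
          · have : v ∉ chosen := fun hvc => absurd (hlt v hvc) (by omega)
            simpa [show v - 1 + 1 = v by ring] using this
        simp [hP]
    · -- room to include v: r = s + 1
      have hr : ∃ s, k.toNat - chosen.length = s + 1 := ⟨k.toNat - chosen.length - 1, by omega⟩
      rcases hr with ⟨s, hs⟩
      rw [hs]
      have hb : ((chosen.length : Int) < k) = True := by
        simp only [eq_iff_iff, iff_true]; omega
      simp only [pyCombos, hb, if_true, List.map_append, List.filter_append, List.map_map]
      congr 1
      · -- include branch
        have := ih (v+1) (chosen ++ [v]) (by omega) (by simp; omega)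
          (by
            intro x hx
            rcases List.mem_append.mp hx with hx | hx
            · exact lt_trans (hlt x hx) (by omega)
            · simp at hx; omega)
          (by
            intro i j h0 hij hjn hjv hm
            by_cases hjv' : j + 1 < v
            · rcases hinv i j h0 hij hjn hjv' hm with h | h
              · exact Or.inl (List.mem_append_left _ h)
              · exact Or.inr (List.mem_append_left _ h)
            · have hjv2 : j + 1 = v := by omega
              exact Or.inr (by simp [hjv2]))
        rw [this]
        have hlen' : k.toNat - (chosen ++ [v]).length = s := by simp; omega
        rw [hlen']
        congr 1
        refine List.map_congr_left fun c _ => ?_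
        show chosen ++ [v] ++ c = chosen ++ (v :: c)
        rw [List.append_assoc, List.singleton_append]
      · -- exclude branch
        by_cases hchk : pvCheckEx matrix chosen v = true
        · rw [if_pos hchk]
          have := ih (v+1) chosen (by omega) hlen
            (fun x hx => lt_trans (hlt x hx) (by omega))
            (by
              intro i j h0 hij hjn hjv hm
              by_cases hjv' : j + 1 < v
              · exact hinv i j h0 hij hjn hjv' hm
              · have hjv2 : j + 1 = v := by omega
                rw [pvCheckEx_iff] at hchk
                have := hchk (i+1) (by omega) (by omega)
                  (by simpa [show i + 1 - 1 = i by ring, show v - 1 = j by omega] using hm)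
                exact Or.inl this)
          rw [this, hs]
        · rw [if_neg hchk]
          -- every extension chosen ++ c fails A's test on the uncovered (u-1, v-1) edge
          rw [pvCheckEx_iff] at hchk
          push_neg at hchk
          rcases hchk with ⟨u, hu1, huv, hm, hunc⟩
          symm
          rw [List.filter_eq_nil_iff]
          intro c hc
          rcases List.mem_map.mp hc with ⟨c', hc', rfl⟩
          have hc'mem := mem_of_mem_pyCombos _ _ _ hc'
          rw [Bool.not_eq_true, Bool.eq_false_iff, ne_eq, pvLoopI_iff]
          push_neg
          refine ⟨u - 1, by rw [PySem.List.mem_pyRange_one]; omega, v - 1, by omega, by omega,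
            hm, ?_, ?_⟩
          · have hu_nc : u ∉ c' := fun h => by
              have := (PySem.List.mem_pyRange_one).mp (hc'mem u h); omega
            have : u ∉ chosen ++ c' := by
              simp only [List.mem_append]; tauto
            simpa [show u - 1 + 1 = u by ring] using this
          · have hv_nch : v ∉ chosen := fun hvc => absurd (hlt v hvc) (by omega)
            have hv_nc : v ∉ c' := fun h => by
              have := (PySem.List.mem_pyRange_one).mp (hc'mem v h); omega
            have : v ∉ chosen ++ c' := by
              simp only [List.mem_append]; tauto
            simpa [show v - 1 + 1 = v by ring] using this

-- ===== VERDICT (by name: the statement is the Claim_ definition above) =====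
theorem check_vertex_cover_spec : Claim_equal_check_vertex_cover := by
  intro matrix k _ hpre
  unfold Spec_check_vertex_cover check_vertex_cover check_vertex_cover_alt
  rw [pvFoldl_filter, List.nil_append,
    pvGo_eq matrix k hpre.1 matrix.length 1 [] (by omega) (by simp)
      (by simp) (by intro i j _ _ _ h _; omega)]
  simp
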